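-- pv_equiv track=rewrite | github.com/paunchygent/huleedu | scripts/dev/list_todos.py | should_skip_by_prefix
-- ===== SOURCE A (Python) =====
-- SKIP_PATH_PREFIXES = [
--     ("documentation",),
--     ("docs",),
--     ("htmlcov",),
--     ("output",),
--     ("dist",),
--     ("build",),
--     ("coverage",),
--     ("__pypackages__",),
--     ("scripts", "archive"),
--     ("scripts", "cj_verification", "output"),
--     ("TASKS", "archive"),
-- ]
--
-- def should_skip_by_prefix(parts: tuple[str, ...] | tuple) -> bool:
--     if not parts:
--         return False
--     for prefix in SKIP_PATH_PREFIXES: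
--         if len(parts) < len(prefix):
--             continue
--         if all(parts[i] == prefix[i] for i in range(len(prefix))):
--             return True
--     return False
-- ===== SOURCE B (Python) =====
-- _SKIP1 = {("documentation",), ("docs",), ("htmlcov",), ("output",), ("dist",),
--           ("build",), ("coverage",), ("__pypackages__",)}
-- _SKIP2 = {("scripts", "archive"), ("TASKS", "archive")}
-- _SKIP3 = {("scripts", "cj_verification", "output")}
--
-- def should_skip_by_prefix(parts):
--     t = tuple(parts)
--     return t[:1] in _SKIP1 or t[:2] in _SKIP2 or t[:3] in _SKIP3
-- ===== Notes on version B (the rewrite author's own statement) =====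
-- stated objective: idiomatic
-- what changed: The per-prefix loop with an element-wise all(...) comparison is replaced by three O(1) hash-set membership tests on the length-1/2/3 slices of parts, with the prefixes pre-grouped by length at module level; the empty-parts guard disappears because no slice of an empty tuple is in any set.
import Mathlib
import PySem

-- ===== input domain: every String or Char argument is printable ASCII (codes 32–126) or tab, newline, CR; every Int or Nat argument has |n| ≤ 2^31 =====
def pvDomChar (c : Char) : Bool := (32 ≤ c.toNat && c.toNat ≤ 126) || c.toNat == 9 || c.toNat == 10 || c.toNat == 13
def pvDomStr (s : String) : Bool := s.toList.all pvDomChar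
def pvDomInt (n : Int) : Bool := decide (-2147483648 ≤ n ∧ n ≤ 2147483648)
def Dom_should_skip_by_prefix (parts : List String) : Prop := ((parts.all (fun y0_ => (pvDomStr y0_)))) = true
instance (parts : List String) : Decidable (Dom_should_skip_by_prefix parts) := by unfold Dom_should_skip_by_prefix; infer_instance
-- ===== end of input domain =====

-- B replaces A's per-prefix loop with three set-membership tests on fixed-length slices (prefixes grouped by length); idiomatic, same behaviour.

-- ===== PORT A =====
def SKIP_PATH_PREFIXES : List (List String) :=
  [["documentation"], ["docs"], ["htmlcov"], ["output"], ["dist"], ["build"],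
   ["coverage"], ["__pypackages__"], ["scripts", "archive"],
   ["scripts", "cj_verification", "output"], ["TASKS", "archive"]]

-- the 'for prefix in SKIP_PATH_PREFIXES' loop with early return
def skipLoopA (parts : List String) : List (List String) → Bool
  | [] => false
  | p :: rest =>
    if parts.length < p.length then skipLoopA parts rest
    else if (List.range p.length).all
        (fun i => parts.getD i "" == p.getD i "") then true
    else skipLoopA parts rest

def should_skip_by_prefix (parts : List String) : Bool :=
  if parts.isEmpty then false
  else skipLoopA parts SKIP_PATH_PREFIXES

-- ===== PORT B =====
def SKIP1 : List (List String) :=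
  [["documentation"], ["docs"], ["htmlcov"], ["output"], ["dist"], ["build"],
   ["coverage"], ["__pypackages__"]]
def SKIP2 : List (List String) := [["scripts", "archive"], ["TASKS", "archive"]]
def SKIP3 : List (List String) := [["scripts", "cj_verification", "output"]]

def should_skip_by_prefix_alt (parts : List String) : Bool :=
  SKIP1.contains (parts.take 1) || SKIP2.contains (parts.take 2)
    || SKIP3.contains (parts.take 3)

-- ===== PRECONDITION & SPEC =====
def Spec_should_skip_by_prefix (parts : List String) (out : Bool) : Prop := out = should_skip_by_prefix_alt parts
instance (parts : List String) (out : Bool) : Decidable (Spec_should_skip_by_prefix parts out) := by unfold Spec_should_skip_by_prefix; infer_instance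

-- ===== CLAIM (what is proved, stated in full; the proofs are below) =====
def Claim_equal_should_skip_by_prefix : Prop := ∀ (parts : List String), Dom_should_skip_by_prefix parts → Spec_should_skip_by_prefix parts (should_skip_by_prefix parts)

-- ===== LEMMAS AND PROOFS =====

-- A's element-wise range test equals list-prefix, once the length guard has passed
theorem allRange_eq_prefix (parts p : List String) (h : p.length ≤ parts.length) :
    ((List.range p.length).all (fun i => parts.getD i "" == p.getD i "")) = decide (p <+: parts) := by
  rw [Bool.eq_iff_iff]
  simp only [List.all_eq_true, List.mem_range, beq_iff_eq, decide_eq_true_eq]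
  rw [List.prefix_iff_getElem]
  constructor
  · intro hf
    refine ⟨h, fun i hi => ?_⟩
    have := hf i hi
    rwa [List.getD_eq_getElem _ _ (lt_of_lt_of_le hi h), List.getD_eq_getElem _ _ hi, eq_comm] at this
  · intro ⟨_, hf⟩ i hi
    rw [List.getD_eq_getElem _ _ (lt_of_lt_of_le hi h), List.getD_eq_getElem _ _ hi]
    exact (hf i hi).symm

-- A's early-return loop is 'any prefix of parts'
theorem loopA_any (parts : List String) :
    ∀ L, skipLoopA parts L = L.any (fun p => decide (p <+: parts)) := by
  intro L
  induction L with
  | nil => rfl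
  | cons p rest ih =>
    rw [skipLoopA, List.any_cons, ih]
    by_cases h : parts.length < p.length
    · have hnp : ¬ (p <+: parts) := fun hp => absurd hp.length_le (by omega)
      simp [h, hnp]
    · rw [if_neg h, allRange_eq_prefix parts p (le_of_not_gt h)]
      by_cases hp : p <+: parts <;> simp [hp]

-- B's fixed-length-slice equality test equals list-prefix
theorem take_beq_eq_prefix (parts p : List String) :
    (parts.take p.length == p) = decide (p <+: parts) := by
  rw [Bool.eq_iff_iff]
  simp only [beq_iff_eq, decide_eq_true_eq, List.prefix_iff_eq_take]
  exact eq_comm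

theorem skip_eq (parts : List String) :
    should_skip_by_prefix parts = should_skip_by_prefix_alt parts := by
  cases parts with
  | nil => rfl
  | cons a t =>
    rw [should_skip_by_prefix, if_neg (by simp), loopA_any]
    rw [should_skip_by_prefix_alt]
    simp only [SKIP_PATH_PREFIXES, SKIP1, SKIP2, SKIP3, List.any_cons, List.any_nil,
      List.contains_cons, List.contains_nil]
    rw [show (List.take 1 (a :: t) == ["documentation"]) = decide (["documentation"] <+: a :: t) from take_beq_eq_prefix (a :: t) ["documentation"]]
    rw [show (List.take 1 (a :: t) == ["docs"]) = decide (["docs"] <+: a :: t) from take_beq_eq_prefix (a :: t) ["docs"]]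
    rw [show (List.take 1 (a :: t) == ["htmlcov"]) = decide (["htmlcov"] <+: a :: t) from take_beq_eq_prefix (a :: t) ["htmlcov"]]
    rw [show (List.take 1 (a :: t) == ["output"]) = decide (["output"] <+: a :: t) from take_beq_eq_prefix (a :: t) ["output"]]
    rw [show (List.take 1 (a :: t) == ["dist"]) = decide (["dist"] <+: a :: t) from take_beq_eq_prefix (a :: t) ["dist"]]
    rw [show (List.take 1 (a :: t) == ["build"]) = decide (["build"] <+: a :: t) from take_beq_eq_prefix (a :: t) ["build"]]
    rw [show (List.take 1 (a :: t) == ["coverage"]) = decide (["coverage"] <+: a :: t) from take_beq_eq_prefix (a :: t) ["coverage"]]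
    rw [show (List.take 1 (a :: t) == ["__pypackages__"]) = decide (["__pypackages__"] <+: a :: t) from take_beq_eq_prefix (a :: t) ["__pypackages__"]]
    rw [show (List.take 2 (a :: t) == ["scripts", "archive"]) = decide (["scripts", "archive"] <+: a :: t) from take_beq_eq_prefix (a :: t) ["scripts", "archive"]]
    rw [show (List.take 2 (a :: t) == ["TASKS", "archive"]) = decide (["TASKS", "archive"] <+: a :: t) from take_beq_eq_prefix (a :: t) ["TASKS", "archive"]]
    rw [show (List.take 3 (a :: t) == ["scripts", "cj_verification", "output"]) = decide (["scripts", "cj_verification", "output"] <+: a :: t) from take_beq_eq_prefix (a :: t) ["scripts", "cj_verification", "output"]]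
    rw [Bool.eq_iff_iff]
    simp only [Bool.or_eq_true, decide_eq_true_eq]
    tauto

-- ===== VERDICT (by name: the statement is the Claim_ definition above) =====
theorem should_skip_by_prefix_spec : Claim_equal_should_skip_by_prefix := by
  intro parts _
  exact skip_eq parts
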